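-- pv_equiv track=rewrite | github.com/dd-213/histogram-matching | src/HistogramMatch.py | points_project
-- ===== SOURCE A (Python) =====
-- def points_project(source_hist, target_hist):
--     projection = list([0] * (len(target_hist[0])) for i in range(3))
--     for channel in range(len(projection)):
--         for x in range(len(source_hist[channel])):
--             i = 0
--             while i < (len(target_hist[0]) - 1) and target_hist[channel][i] <= source_hist[channel][x]:
--                 i += 1
--             projection[channel][x] = i
--     return projection
-- ===== SOURCE B (Python) =====
-- def points_project(source_hist, target_hist):
--     # Per channel: prefix maxima of the first T-1 target entries form a
--     # non-decreasing list, so each source value is placed by binary search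
--     # instead of A's linear scan.
--     T = len(target_hist[0])
--     projection = []
--     for c in range(3):
--         m = []
--         for v in target_hist[c][:T - 1]:
--             m.append(v if not m or v > m[-1] else m[-1])
--         row = []
--         for v in source_hist[c][:T]:
--             lo, hi = 0, len(m)
--             while lo < hi:
--                 mid = (lo + hi) // 2
--                 if m[mid] <= v:
--                     lo = mid + 1
--                 else:
--                     hi = mid
--             row.append(lo)
--         row += [0] * (T - len(row))
--         projection.append(row)
--     return projection
-- ===== Notes on version B (the rewrite author's own statement) =====
-- stated objective: faster
-- what changed: A's per-value linear scan over the target channel is replaced by a one-time prefix-maximum pass per channel followed by a hand-written binary search for each source value (prefix maxima are non-decreasing, and the scan length equals the insertion point in them).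
import Mathlib
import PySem

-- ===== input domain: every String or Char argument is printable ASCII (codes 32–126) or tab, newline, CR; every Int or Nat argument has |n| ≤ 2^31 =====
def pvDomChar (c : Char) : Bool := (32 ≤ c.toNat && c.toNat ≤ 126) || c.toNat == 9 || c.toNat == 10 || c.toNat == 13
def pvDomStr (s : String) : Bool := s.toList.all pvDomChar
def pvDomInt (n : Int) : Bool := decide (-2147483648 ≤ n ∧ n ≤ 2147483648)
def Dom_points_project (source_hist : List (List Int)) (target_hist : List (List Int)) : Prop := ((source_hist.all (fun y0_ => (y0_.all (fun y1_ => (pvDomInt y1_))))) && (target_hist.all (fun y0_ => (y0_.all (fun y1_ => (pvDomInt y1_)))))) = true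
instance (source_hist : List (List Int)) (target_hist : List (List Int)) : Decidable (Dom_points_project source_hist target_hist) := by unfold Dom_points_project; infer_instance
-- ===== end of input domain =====

-- B replaces A's per-value linear scan of each target channel by a prefix-maximum
-- pass plus a binary search per source value (asymptotically faster, exact same output).


-- ===== PORT A =====
-- the inner 'while i < T-1 and target_hist[channel][i] <= v: i += 1' loop
def scanA (tch : List Int) (tm1 : Nat) (v : Int) (i : Nat) : Nat :=
  if _h : i < tm1 then
    if PySem.List.pyGetD tch (i : Int) 0 ≤ v then scanA tch tm1 v (i + 1) else i
  else i
termination_by tm1 - i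

def points_project (source_hist : List (List Int)) (target_hist : List (List Int)) : List (List Int) :=
  -- projection = [[0]*len(target_hist[0]) for i in range(3)]
  let T := (PySem.List.pyGetD target_hist 0 []).length
  (List.range 3).map (fun (channel : Nat) =>
    (List.range (PySem.List.pyGetD source_hist (channel : Int) []).length).foldl
      (fun row x =>
        row.set x
          (Int.ofNat (scanA (PySem.List.pyGetD target_hist (channel : Int) []) (T - 1)
            (PySem.List.pyGetD (PySem.List.pyGetD source_hist (channel : Int) []) (x : Int) 0) 0)))
      (List.replicate T 0))

-- ===== PORT B =====
-- the hand-written 'while lo < hi' binary search of Source B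
def bisLoop (m : List Int) (v : Int) (lo hi : Nat) : Nat :=
  if _h : lo < hi then
    let mid := (lo + hi) / 2
    if PySem.List.pyGetD m (mid : Int) 0 ≤ v then bisLoop m v (mid + 1) hi
    else bisLoop m v lo mid
  else lo
termination_by hi - lo
decreasing_by all_goals omega

def points_project_alt (source_hist : List (List Int)) (target_hist : List (List Int)) : List (List Int) :=
  let T := (PySem.List.pyGetD target_hist 0 []).length
  (List.range 3).map (fun (c : Nat) =>
    -- m = prefix maxima of target_hist[c][:T-1]
    let m := (PySem.List.slice (PySem.List.pyGetD target_hist (c : Int) []) none (some ((T : Int) - 1))).foldl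
      (fun m v =>
        m ++ [if m = [] then v
              else if PySem.List.pyGetD m (-1) 0 < v then v
              else PySem.List.pyGetD m (-1) 0]) []
    let row := (PySem.List.slice (PySem.List.pyGetD source_hist (c : Int) []) none (some (T : Int))).map
      (fun v => (Int.ofNat (bisLoop m v 0 m.length)))
    row ++ List.replicate (T - row.length) 0)

-- ===== PRECONDITION & SPEC =====
-- Pre_ excludes exactly the shapes on which A's subscripting can raise IndexError: fewer than
-- three source or target channels, a source channel longer than the projection row
-- len(target_hist[0]), or a target channel so short that the scan can read past its end
-- (the last condition is a closed-form over-approximation: on a few such ragged inputs A's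
-- scan happens to stop early and returns the same value B does — see the cite).
def Pre_points_project (source_hist : List (List Int)) (target_hist : List (List Int)) : Prop :=
  3 ≤ source_hist.length ∧ 3 ≤ target_hist.length ∧
  ∀ c < 3, (source_hist.getD c []).length ≤ (target_hist.getD 0 []).length ∧
           (target_hist.getD 0 []).length ≤ (target_hist.getD c []).length + 1
instance (source_hist : List (List Int)) (target_hist : List (List Int)) : Decidable (Pre_points_project source_hist target_hist) := by unfold Pre_points_project; infer_instance

def pvWitness_points_project : List (List Int) × List (List Int) :=
  ([[1], [2], [3]], [[0, 2], [0, 2], [0, 2]])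

def Spec_points_project (source_hist : List (List Int)) (target_hist : List (List Int)) (out : List (List Int)) : Prop := out = points_project_alt source_hist target_hist
instance (source_hist : List (List Int)) (target_hist : List (List Int)) (out : List (List Int)) : Decidable (Spec_points_project source_hist target_hist out) := by unfold Spec_points_project; infer_instance

-- ===== CLAIM (what is proved, stated in full; the proofs are below) =====
def Claim_equal_points_project : Prop := ∀ (source_hist : List (List Int)) (target_hist : List (List Int)), Dom_points_project source_hist target_hist → Pre_points_project source_hist target_hist → Spec_points_project source_hist target_hist (points_project source_hist target_hist)

-- ===== LEMMAS AND PROOFS =====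

-- recursive characterisation of the prefix-maximum list from running max c
def pmRec (c : Int) : List Int → List Int
  | [] => []
  | v :: r => max c v :: pmRec (max c v) r

-- A's scan counts the longest all-≤-v prefix of the first tm1 target entries
lemma scanA_eq (tch : List Int) (tm1 : Nat) (v : Int) :
    ∀ i, i ≤ tm1 → tm1 ≤ tch.length →
      scanA tch tm1 v i = i + (((tch.drop i).take (tm1 - i)).takeWhile (fun a => decide (a ≤ v))).length := by
  suffices H : ∀ n i, tm1 - i = n → i ≤ tm1 → tm1 ≤ tch.length →
      scanA tch tm1 v i = i + (((tch.drop i).take (tm1 - i)).takeWhile (fun a => decide (a ≤ v))).length by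
    intro i h1 h2; exact H _ i rfl h1 h2
  intro n
  induction n with
  | zero =>
    intro i hni hi _
    have hieq : i = tm1 := by omega
    rw [scanA]
    simp [hieq]
  | succ n ih =>
    intro i hni hi ht
    have hlt : i < tm1 := by omega
    have hidx : i < tch.length := by omega
    rw [scanA]
    rw [dif_pos hlt]
    have hget : PySem.List.pyGetD tch (i : Int) 0 = tch[i] := by
      simp [PySem.List.pyGetD_natCast, List.getD_eq_getElem?_getD,
        List.getElem?_eq_getElem hidx]
    have hsplit : (tch.drop i).take (tm1 - i) =
        tch[i] :: (tch.drop (i + 1)).take (tm1 - (i + 1)) := by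
      rw [List.drop_eq_getElem_cons hidx]
      have : tm1 - i = (tm1 - (i + 1)) + 1 := by omega
      rw [this, List.take_succ_cons]
    rw [hget, hsplit]
    by_cases hv : tch[i] ≤ v
    · rw [if_pos hv, ih (i + 1) (by omega) (by omega) ht]
      simp [hv]
      omega
    · rw [if_neg hv]
      simp [hv]

lemma if_lt_eq_max (a v : Int) : (if a < v then v else a) = max a v := by
  rcases lt_or_ge a v with h | h
  · simp [h, max_eq_right h.le]
  · simp [not_lt.mpr h, max_eq_left h]

lemma foldPM_go (r : List Int) : ∀ (m : List Int) (hm : m ≠ []),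
    r.foldl (fun m v =>
        m ++ [if m = [] then v
              else if PySem.List.pyGetD m (-1) 0 < v then v
              else PySem.List.pyGetD m (-1) 0]) m =
      m ++ pmRec (m.getLast hm) r := by
  induction r with
  | nil => intro m hm; simp [pmRec]
  | cons v rest ih =>
    intro m hm
    rw [List.foldl_cons]
    have hlast : PySem.List.pyGetD m (-1) 0 = m.getLast hm :=
      PySem.List.pyGetD_neg_one m 0 hm
    have hstep : (m ++ [if m = [] then v
        else if PySem.List.pyGetD m (-1) 0 < v then v
        else PySem.List.pyGetD m (-1) 0]) = m ++ [max (m.getLast hm) v] := by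
      rw [if_neg hm, hlast, if_lt_eq_max]
    rw [hstep, ih (m ++ [max (m.getLast hm) v]) (by simp)]
    have hgl : (m ++ [max (m.getLast hm) v]).getLast (by simp) = max (m.getLast hm) v :=
      List.getLast_concat
    rw [hgl, List.append_assoc]
    rfl

-- B's fold builds v :: pmRec v r on a nonempty slice
lemma foldPM_eq (l : List Int) :
    l.foldl (fun m v =>
        m ++ [if m = [] then v
              else if PySem.List.pyGetD m (-1) 0 < v then v
              else PySem.List.pyGetD m (-1) 0]) [] =
      match l with
      | [] => []
      | v :: r => v :: pmRec v r := by
  cases l with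
  | nil => rfl
  | cons v r =>
    rw [List.foldl_cons]
    simp only [List.nil_append]
    exact foldPM_go r [v] (by simp)

lemma pmRec_takeWhile (v : Int) : ∀ (l : List Int) (c : Int), c ≤ v →
    ((pmRec c l).takeWhile (fun a => decide (a ≤ v))).length =
      (l.takeWhile (fun a => decide (a ≤ v))).length := by
  intro l
  induction l with
  | nil => intro c _; rfl
  | cons a r ih =>
    intro c hcv
    by_cases ha : a ≤ v
    · have hmax : max c a ≤ v := max_le hcv ha
      simp [pmRec, ha, hmax, ih (max c a) hmax]
    · have hmax : ¬ max c a ≤ v := by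
        intro h; exact ha (le_trans (le_max_right c a) h)
      simp [pmRec, ha, hmax]

lemma pmRec_ge (c : Int) (l : List Int) : ∀ x ∈ pmRec c l, c ≤ x := by
  induction l generalizing c with
  | nil => simp [pmRec]
  | cons a r ih =>
    intro x hx
    rcases List.mem_cons.mp hx with h | h
    · subst h; exact le_max_left c a
    · exact le_trans (le_max_left c a) (ih (max c a) x h)

lemma pmRec_pairwise (c : Int) (l : List Int) : (pmRec c l).Pairwise (· ≤ ·) := by
  induction l generalizing c with
  | nil => simp [pmRec]
  | cons a r ih =>
    exact List.pairwise_cons.mpr ⟨pmRec_ge (max c a) r, ih (max c a)⟩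

lemma takeWhile_getElem_lt {p : Int → Bool} : ∀ (m : List Int) (k : Nat)
    (_hk : k < (m.takeWhile p).length) (hk' : k < m.length), p m[k] = true := by
  intro m
  induction m with
  | nil => intro k hk hk'; simp at hk'
  | cons a r ih =>
    intro k hk hk'
    by_cases ha : p a
    · cases k with
      | zero => simpa using ha
      | succ k =>
        simp only [List.takeWhile_cons, ha, if_true, List.length_cons] at hk
        exact ih k (by omega) (by simpa using hk')
    · simp [ha] at hk

lemma takeWhile_getElem_stop {p : Int → Bool} : ∀ (m : List Int)
    (h : (m.takeWhile p).length < m.length), p (m[(m.takeWhile p).length]) = false := by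
  intro m
  induction m with
  | nil => intro h; simp at h
  | cons a r ih =>
    intro h
    by_cases ha : p a
    · simp only [List.takeWhile_cons, ha, if_true, List.length_cons] at h ⊢
      exact ih (by omega)
    · simp [ha]

-- the binary search lands exactly on the takeWhile length of a non-decreasing list
lemma bisLoop_eq (m : List Int) (v : Int) (hm : m.Pairwise (· ≤ ·)) :
    ∀ lo hi, lo ≤ (m.takeWhile (fun a => decide (a ≤ v))).length →
      (m.takeWhile (fun a => decide (a ≤ v))).length ≤ hi → hi ≤ m.length →
      bisLoop m v lo hi = (m.takeWhile (fun a => decide (a ≤ v))).length := by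
  set R := (m.takeWhile (fun a => decide (a ≤ v))).length with hRdef
  have hRlen : R ≤ m.length := (List.takeWhile_prefix _).length_le
  suffices H : ∀ n lo hi, hi - lo = n → lo ≤ R → R ≤ hi → hi ≤ m.length →
      bisLoop m v lo hi = R by
    intro lo hi h1 h2 h3; exact H _ lo hi rfl h1 h2 h3
  intro n
  induction n using Nat.strong_induction_on with
  | _ n ih =>
    intro lo hi hn hlo hhi hlen
    rw [bisLoop]
    by_cases hcmp : lo < hi
    · rw [dif_pos hcmp]
      have hmid1 : lo ≤ (lo + hi) / 2 := by omega
      have hmid2 : (lo + hi) / 2 < hi := by omega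
      have hmidlen : (lo + hi) / 2 < m.length := by omega
      have hget : PySem.List.pyGetD m (((lo + hi) / 2 : Nat) : Int) 0 = m[(lo + hi) / 2] := by
        rw [PySem.List.pyGetD_natCast, List.getD_eq_getElem?_getD,
          List.getElem?_eq_getElem hmidlen, Option.getD_some]
      show (if PySem.List.pyGetD m (((lo + hi) / 2 : Nat) : Int) 0 ≤ v then
          bisLoop m v ((lo + hi) / 2 + 1) hi else bisLoop m v lo ((lo + hi) / 2)) = R
      rw [hget]
      by_cases hv : m[(lo + hi) / 2] ≤ v
      · rw [if_pos hv]
        have hR : (lo + hi) / 2 < R := by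
          by_contra hc
          rw [not_lt] at hc
          have hRlt : R < m.length := by omega
          have hstop : (fun a => decide (a ≤ v)) m[R] = false :=
            takeWhile_getElem_stop m hRlt
          have hmono : m[R] ≤ m[(lo + hi) / 2] := by
            rcases Nat.lt_or_ge R ((lo + hi) / 2) with h | h
            · exact List.pairwise_iff_getElem.mp hm R _ hRlt hmidlen h
            · have : R = (lo + hi) / 2 := by omega
              simp [this]
          simp only [decide_eq_false_iff_not] at hstop
          exact hstop (le_trans hmono hv)
        exact ih (hi - ((lo + hi) / 2 + 1)) (by omega) _ hi rfl (by omega) hhi hlen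
      · rw [if_neg hv]
        have hR : R ≤ (lo + hi) / 2 := by
          by_contra hc
          rw [not_le] at hc
          have := takeWhile_getElem_lt m ((lo + hi) / 2) hc hmidlen
          simp only [decide_eq_true_eq] at this
          exact hv this
        exact ih ((lo + hi) / 2 - lo) (by omega) lo _ rfl hlo hR (by omega)
    · rw [dif_neg hcmp]
      omega

-- writing g 0, …, g (n-1) into the first n slots of r
lemma foldl_set_range (g : Nat → Int) : ∀ (n : Nat) (r : List Int), n ≤ r.length →
    (List.range n).foldl (fun row x => row.set x (g x)) r = (List.range n).map g ++ r.drop n := by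
  intro n
  induction n with
  | zero => intro r _; simp
  | succ n ih =>
    intro r hr
    have hn : n < r.length := by omega
    rw [List.range_succ, List.foldl_append, ih r (by omega)]
    simp only [List.foldl_cons, List.foldl_nil, List.map_append, List.map_cons, List.map_nil]
    rw [List.set_append_right _ _ (by simp)]
    simp only [List.length_map, List.length_range, Nat.sub_self]
    rw [List.drop_eq_getElem_cons hn, List.set_cons_zero]
    simp

lemma map_getD_range (l : List Int) (f : Int → Int) :
    (List.range l.length).map (fun x => f (l.getD x 0)) = l.map f := by
  apply List.ext_getElem (by simp)
  intro i h1 h2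
  have hi : i < l.length := by simpa using h1
  simp [List.getD_eq_getElem?_getD, List.getElem?_eq_getElem hi]

-- per-channel equality
lemma channel_eq (sc tc : List Int) (T : Nat)
    (hs : sc.length ≤ T) (ht : T ≤ tc.length + 1) :
    (List.range sc.length).foldl
        (fun row x => row.set x (Int.ofNat (scanA tc (T - 1) (sc.getD x 0) 0)))
        (List.replicate T 0) =
      (let m := (PySem.List.slice tc none (some ((T : Int) - 1))).foldl
          (fun m v =>
            m ++ [if m = [] then v
                  else if PySem.List.pyGetD m (-1) 0 < v then v
                  else PySem.List.pyGetD m (-1) 0]) []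
        let row := (PySem.List.slice sc none (some (T : Int))).map
          (fun v => (Int.ofNat (bisLoop m v 0 m.length)))
        row ++ List.replicate (T - row.length) 0) := by
  simp only []
  cases T with
  | zero =>
    have hsc : sc = [] := List.eq_nil_iff_length_eq_zero.mpr (by omega)
    subst hsc
    simp [PySem.List.slice]
  | succ T' =>
    have hT' : T' ≤ tc.length := by omega
    have hsl1 : PySem.List.slice tc none (some (((T' + 1 : Nat) : Int) - 1)) = tc.take T' := by
      have : ((T' + 1 : Nat) : Int) - 1 = ((T' : Nat) : Int) := by push_cast; ring
      rw [this, PySem.List.slice_to_natCast]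
    have hsl2 : PySem.List.slice sc none (some ((T' + 1 : Nat) : Int)) = sc := by
      rw [PySem.List.slice_to_natCast, List.take_of_length_le hs]
    rw [foldl_set_range _ sc.length (List.replicate (T' + 1) 0) (by simpa using hs)]
    rw [map_getD_range sc (fun w => Int.ofNat (scanA tc (T' + 1 - 1) w 0))]
    rw [List.drop_replicate]
    rw [hsl1, hsl2]
    congr 1
    · -- the mapped values agree elementwise
      apply List.map_congr_left
      intro v _
      congr 1
      -- scanA = takeWhile length on tc.take T'
      have hscan : scanA tc (T' + 1 - 1) v 0 =
          ((tc.take T').takeWhile (fun a => decide (a ≤ v))).length := by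
        have := scanA_eq tc (T' + 1 - 1) v 0 (by omega) (by omega)
        simpa using this
      rw [hscan, foldPM_eq]
      cases htc : tc.take T' with
      | nil => rw [bisLoop]; simp
      | cons v0 r =>
        have hpair : (v0 :: pmRec v0 r).Pairwise (· ≤ ·) :=
          List.pairwise_cons.mpr ⟨pmRec_ge v0 r, pmRec_pairwise v0 r⟩
        have htw : ((v0 :: r).takeWhile (fun a => decide (a ≤ v))).length =
            ((v0 :: pmRec v0 r).takeWhile (fun a => decide (a ≤ v))).length := by
          by_cases hv0 : v0 ≤ v
          · simp [hv0, pmRec_takeWhile v r v0 hv0]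
          · simp [hv0]
        rw [htw]
        exact (bisLoop_eq _ v hpair 0 _ (Nat.zero_le _)
          (List.takeWhile_prefix _).length_le le_rfl).symm
    · simp

-- ===== VERDICT (by name: the statement is the Claim_ definition above) =====
theorem points_project_spec : Claim_equal_points_project := by
  intro s t _hDom hPre
  obtain ⟨hs3, ht3, hc⟩ := hPre
  unfold Spec_points_project points_project points_project_alt
  apply List.map_congr_left
  intro c hcmem
  have hc3 : c < 3 := List.mem_range.mp hcmem
  obtain ⟨h1, h2⟩ := hc c hc3
  simpa [PySem.List.pyGetD_natCast, PySem.List.pyGetD_zero] using channel_eq (s.getD c []) (t.getD c []) ((t.getD 0 []).length) h1 h2
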